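-- pv_equiv track=rewrite | github.com/KayanatSuleman/CFG_Assessment_2 | Section_2_Answer.py | is_isogram
-- ===== SOURCE A (Python) =====
-- def is_isogram(str_input):
--     unique_letters = set()
--
--     for letters in str_input:
--         lowercase_letter = letters.lower()
--         if lowercase_letter in unique_letters:
--             return False
--         unique_letters.add(lowercase_letter)
--
--     return True
--
--     done
-- ===== SOURCE B (Python) =====
-- def is_isogram(str_input):
--     chars = [c.lower() for c in str_input]
--     return len(set(chars)) == len(chars)
-- ===== Notes on version B (the rewrite author's own statement) =====
-- stated objective: idiomatic
-- what changed: Replaces the incremental seen-set with early return by materialising the lowercased characters once and comparing len(set(chars)) with len(chars).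
import Mathlib
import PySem

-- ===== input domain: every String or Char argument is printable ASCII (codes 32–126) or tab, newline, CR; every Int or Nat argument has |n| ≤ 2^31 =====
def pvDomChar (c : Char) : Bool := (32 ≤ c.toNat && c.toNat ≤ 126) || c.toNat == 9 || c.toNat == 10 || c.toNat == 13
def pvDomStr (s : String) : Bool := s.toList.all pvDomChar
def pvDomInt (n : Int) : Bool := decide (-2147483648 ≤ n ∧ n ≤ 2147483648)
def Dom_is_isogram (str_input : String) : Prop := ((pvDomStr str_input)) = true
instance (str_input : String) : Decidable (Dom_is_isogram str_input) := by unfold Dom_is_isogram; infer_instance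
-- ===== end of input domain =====

-- B lowercases each character once and compares len(set(chars)) with len(chars): idiomatic, no early return.

-- ===== PORT A =====
def isogramLoop : List Char → PySem.Set Char → Bool
  | [], _ => true
  | c :: rest, seen =>
    let lc := PySem.Chars.lowerChar c
    if PySem.Set.contains seen lc then false
    else isogramLoop rest (PySem.Set.add seen lc)

def is_isogram (str_input : String) : Bool :=
  isogramLoop str_input.toList PySem.Set.empty

-- ===== PORT B =====
def is_isogram_alt (str_input : String) : Bool :=
  let chars := str_input.toList.map PySem.Chars.lowerChar
  PySem.Set.len (PySem.Set.ofList chars) == PySem.List.len chars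

-- ===== PRECONDITION & SPEC =====
def Spec_is_isogram (str_input : String) (out : Bool) : Prop := out = is_isogram_alt str_input
instance (str_input : String) (out : Bool) : Decidable (Spec_is_isogram str_input out) := by unfold Spec_is_isogram; infer_instance

-- ===== CLAIM (what is proved, stated in full; the proofs are below) =====
def Claim_equal_is_isogram : Prop := ∀ (str_input : String), Dom_is_isogram str_input → Spec_is_isogram str_input (is_isogram str_input)

-- ===== LEMMAS AND PROOFS =====

theorem isogramLoop_char (l : List Char) :
    ∀ s : PySem.Set Char,
      isogramLoop l s
        = decide ((l.map PySem.Chars.lowerChar).Nodup ∧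
            ∀ x ∈ l, PySem.Chars.lowerChar x ∉ s) := by
  induction l with
  | nil => intro s; simp [isogramLoop]
  | cons c rest ih =>
    intro s
    by_cases h : PySem.Chars.lowerChar c ∈ s
    · simp [isogramLoop, h]
    · have hc : PySem.Set.contains s (PySem.Chars.lowerChar c) = false := by
        by_contra hcc
        exact h ((PySem.Set.contains_iff s _).1 (by simpa using hcc))
      simp only [isogramLoop, hc, Bool.false_eq_true, if_false]
      rw [ih, decide_eq_decide]
      have hmem : ∀ x, x ∈ PySem.Set.add s (PySem.Chars.lowerChar c) ↔
          x ∈ s ∨ x = PySem.Chars.lowerChar c := fun x => PySem.Set.mem_add s _ x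
      constructor
      · rintro ⟨hn, hf⟩
        have hf' : ∀ x ∈ rest, PySem.Chars.lowerChar x ∉ s ∧
            PySem.Chars.lowerChar x ≠ PySem.Chars.lowerChar c := by
          intro x hx
          have := hf x hx
          rw [hmem] at this
          exact ⟨fun hh => this (Or.inl hh), fun hh => this (Or.inr hh)⟩
        refine ⟨?_, ?_⟩
        · simp only [List.map_cons, List.nodup_cons, List.mem_map]
          exact ⟨fun ⟨x, hx, hxe⟩ => (hf' x hx).2 hxe, hn⟩
        · intro x hx
          rcases List.mem_cons.1 hx with rfl | hx
          · exact h
          · exact (hf' x hx).1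
      · rintro ⟨hn, hf⟩
        simp only [List.map_cons, List.nodup_cons, List.mem_map] at hn
        refine ⟨hn.2, fun x hx hm => ?_⟩
        rw [hmem] at hm
        rcases hm with hm | hm
        · exact hf x (List.mem_cons_of_mem _ hx) hm
        · exact hn.1 ⟨x, hx, hm⟩

theorem ofList_sublist {α : Type} [BEq α] [LawfulBEq α] (xs : List α) :
    List.Sublist (PySem.Set.ofList xs) xs := by
  induction xs with
  | nil => simp [PySem.Set.ofList_nil]
  | cons x xs ih =>
    rw [PySem.Set.ofList_cons]
    refine List.Sublist.cons₂ x (List.Sublist.trans ?_ ih)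
    simp only [PySem.Set.discard]
    exact List.filter_sublist

theorem ofList_length_eq_iff {α : Type} [BEq α] [LawfulBEq α] (xs : List α) :
    (PySem.Set.ofList xs : List α).length = xs.length ↔ xs.Nodup := by
  constructor
  · intro h
    have he := (ofList_sublist xs).eq_of_length h
    simpa [he] using PySem.Set.nodup_ofList (xs := xs)
  · intro h; rw [PySem.Set.ofList_eq_self_of_nodup xs h]

theorem is_isogram_spec : Claim_equal_is_isogram := by
  intro s _
  unfold Spec_is_isogram is_isogram is_isogram_alt
  rw [isogramLoop_char]
  simp only [PySem.Set.len, PySem.List.len]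
  rcases eq_or_ne ((PySem.Set.ofList (s.toList.map PySem.Chars.lowerChar) : List Char).length)
      ((s.toList.map PySem.Chars.lowerChar).length) with h | h
  · simp [h, (ofList_length_eq_iff _).1 h, PySem.Set.empty]
  · have hn : ¬ (s.toList.map PySem.Chars.lowerChar).Nodup :=
      fun hnd => h ((ofList_length_eq_iff _).2 hnd)
    simp only [List.length_map] at h
    simp [hn]
    simpa using h
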